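-- pv_equiv track=rewrite | github.com/ruixiang-wang/OGSM | datasets/knap_sack/origin.py | nearest_insertion
-- ===== SOURCE A (Python) =====
-- def nearest_insertion(weights, values, capacity):
--     n = len(weights)
--     solution = [0] * n  # 当前物品选择情况
--     total_weight_value = 0  # 当前背包的总重量
--     total_value_value = 0  # 当前背包的总价值
--
--     # 初始化所有物品按价值排序，准备插入
--     items = [(values[i], weights[i], i) for i in range(n)]  # (价值, 质量, 物品索引)
--     items.sort(reverse=True, key=lambda x: x[0])  # 按照价值降序排序
--
--     for value, weight, i in items:
--         if total_weight_value + weight <= capacity:  # 如果加上当前物品不超重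
--             solution[i] = 1  # 选择当前物品
--             total_weight_value += weight
--             total_value_value += value
--
--     return solution, total_value_value
-- ===== SOURCE B (Python) =====
-- def nearest_insertion(weights, values, capacity):
--     # Repeated max-scan selection instead of sorting: each round picks the
--     # unprocessed item of highest value (first one on ties, matching a stable
--     # descending sort) and takes it if it still fits.
--     n = len(weights)
--     solution = [0] * n
--     total_weight = 0
--     total_value = 0
--     remaining = [(values[i], weights[i], i) for i in range(n)]
--     while remaining:
--         best = remaining[0]
--         for it in remaining[1:]:
--             if best[0] < it[0]:
--                 best = it
--         remaining.remove(best)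
--         value, weight, i = best
--         if total_weight + weight <= capacity:
--             solution[i] = 1
--             total_weight += weight
--             total_value += value
--     return solution, total_value
-- ===== Notes on version B (the rewrite author's own statement) =====
-- stated objective: alternative
-- what changed: Replaces the upfront stable descending sort followed by a single greedy pass with repeated max-scan selection: each round scans the remaining items for the first highest-value one, removes it, and takes it if it fits; B is quadratic, so it is slower than A on large inputs.
import Mathlib
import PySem

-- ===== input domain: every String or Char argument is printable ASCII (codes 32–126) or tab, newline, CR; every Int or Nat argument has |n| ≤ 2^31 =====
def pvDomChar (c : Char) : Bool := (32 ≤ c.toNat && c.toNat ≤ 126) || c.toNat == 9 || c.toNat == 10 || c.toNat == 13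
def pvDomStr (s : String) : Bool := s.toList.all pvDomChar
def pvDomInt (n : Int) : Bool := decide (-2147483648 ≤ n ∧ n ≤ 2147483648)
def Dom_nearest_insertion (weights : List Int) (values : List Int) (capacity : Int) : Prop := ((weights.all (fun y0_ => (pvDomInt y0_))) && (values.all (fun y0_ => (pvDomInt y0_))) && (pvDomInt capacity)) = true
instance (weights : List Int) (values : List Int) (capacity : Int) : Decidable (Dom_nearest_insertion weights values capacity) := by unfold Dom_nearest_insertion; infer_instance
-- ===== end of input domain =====

-- B replaces A's sort-then-scan with repeated max-scan selection over the remaining items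
-- (same return value; an alternative decomposition, not claimed faster).

-- ===== PORT A =====
def nearest_insertion (weights : List Int) (values : List Int) (capacity : Int) : List Int × Int :=
  let n : Int := (weights.length : Int)
  let solution : List Int := List.replicate weights.length 0
  let items : List (Int × Int × Int) :=
    (PySem.List.pyRange 0 n 1).map
      (fun i => (PySem.List.pyGetD values i 0, PySem.List.pyGetD weights i 0, i))
  let sortedItems := PySem.List.sorted items (fun x => x.1) true
  let st := sortedItems.foldl
    (fun (st : List Int × Int × Int) it =>
      if st.2.1 + it.2.1 ≤ capacity then (st.1.set it.2.2.toNat 1, st.2.1 + it.2.1, st.2.2 + it.1)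
      else st)
    (solution, 0, 0)
  (st.1, st.2.2)

-- ===== PORT B =====
-- Source B's inner 'for it in remaining[1:]' running max; strict '<' so the first maximum wins
def pvBest (b : Int × Int × Int) (rest : List (Int × Int × Int)) : Int × Int × Int :=
  rest.foldl (fun b it => if b.1 < it.1 then it else b) b

-- termination fact for selLoop (remaining.remove(best) shortens the list)
theorem pvRemoveLen (r0 : Int × Int × Int) (rest : List (Int × Int × Int)) (v : Int × Int × Int) :
    ((PySem.List.remove? (r0 :: rest) v).getD []).length < (r0 :: rest).length := by
  by_cases h : v ∈ r0 :: rest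
  · rw [PySem.List.remove?_eq_some_erase _ _ h, Option.getD_some,
        List.length_erase_of_mem h]
    simp
  · have hn : PySem.List.remove? (r0 :: rest) v = none := by
      rw [PySem.List.remove?_eq_none_iff]; exact h
    rw [hn]
    simp

-- Source B's while-loop: pick the first highest-value remaining item, remove it, take it if it fits
def selLoop (remaining : List (Int × Int × Int)) (solution : List Int) (tw tv capacity : Int) :
    List Int × Int :=
  match remaining with
  | [] => (solution, tv)
  | r0 :: rest =>
    let best := pvBest r0 rest
    let remaining' := (PySem.List.remove? (r0 :: rest) best).getD []
    if tw + best.2.1 ≤ capacity then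
      selLoop remaining' (solution.set best.2.2.toNat 1) (tw + best.2.1) (tv + best.1) capacity
    else
      selLoop remaining' solution tw tv capacity
termination_by remaining.length
decreasing_by
  · exact pvRemoveLen r0 rest (pvBest r0 rest)
  · exact pvRemoveLen r0 rest (pvBest r0 rest)

def nearest_insertion_alt (weights : List Int) (values : List Int) (capacity : Int) : List Int × Int :=
  let n : Int := (weights.length : Int)
  let remaining : List (Int × Int × Int) :=
    (PySem.List.pyRange 0 n 1).map
      (fun i => (PySem.List.pyGetD values i 0, PySem.List.pyGetD weights i 0, i))
  selLoop remaining (List.replicate weights.length 0) 0 0 capacity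

-- ===== PRECONDITION & SPEC =====
-- Pre_ excludes inputs where values is shorter than weights: there Python A (and B) raise IndexError.
def Pre_nearest_insertion (weights : List Int) (values : List Int) (capacity : Int) : Prop :=
  weights.length ≤ values.length
instance (weights : List Int) (values : List Int) (capacity : Int) : Decidable (Pre_nearest_insertion weights values capacity) := by unfold Pre_nearest_insertion; infer_instance

def pvWitness_nearest_insertion : List Int × List Int × Int := ([2, 3, 1], [5, 4, 6], 4)

def Spec_nearest_insertion (weights : List Int) (values : List Int) (capacity : Int) (out : List Int × Int) : Prop := out = nearest_insertion_alt weights values capacity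
instance (weights : List Int) (values : List Int) (capacity : Int) (out : List Int × Int) : Decidable (Spec_nearest_insertion weights values capacity out) := by unfold Spec_nearest_insertion; infer_instance

-- ===== CLAIM (what is proved, stated in full; the proofs are below) =====
def Claim_equal_nearest_insertion : Prop := ∀ (weights : List Int) (values : List Int) (capacity : Int), Dom_nearest_insertion weights values capacity → Pre_nearest_insertion weights values capacity → Spec_nearest_insertion weights values capacity (nearest_insertion weights values capacity)

-- ===== LEMMAS AND PROOFS =====

theorem pvBest_mem (b : Int × Int × Int) (rest : List (Int × Int × Int)) :
    pvBest b rest ∈ b :: rest := by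
  induction rest generalizing b with
  | nil => simp [pvBest]
  | cons r rs ih =>
    have h := ih (if b.1 < r.1 then r else b)
    simp only [pvBest, List.foldl_cons] at *
    simp only [List.mem_cons] at h ⊢
    rcases h with h | h
    · by_cases hbr : b.1 < r.1 <;> simp only [hbr, if_true, if_false] at h ⊢ <;> simp [h]
    · simp [h]

theorem pvBest_max (b : Int × Int × Int) (rest : List (Int × Int × Int)) :
    ∀ y ∈ b :: rest, y.1 ≤ (pvBest b rest).1 := by
  induction rest generalizing b with
  | nil => simp [pvBest]
  | cons r rs ih =>
    intro y hy
    have hstep : ∀ z ∈ [b, r], z.1 ≤ (if b.1 < r.1 then r else b).1 := by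
      intro z hz; simp at hz
      rcases hz with h | h <;> subst h <;> split <;> omega
    have h2 := ih (if b.1 < r.1 then r else b)
    simp only [pvBest, List.foldl_cons] at *
    rcases List.mem_cons.mp hy with h | h
    · subst h
      exact le_trans (hstep y (by simp)) (h2 _ (by simp))
    · rcases List.mem_cons.mp h with h | h
      · subst h
        exact le_trans (hstep y (by simp)) (h2 _ (by simp))
      · exact h2 y (by simp [h])

theorem pvEraseBestLen (r0 : Int × Int × Int) (rest : List (Int × Int × Int)) :
    (((r0 :: rest).erase (pvBest r0 rest)).length) < (r0 :: rest).length := by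
  rw [List.length_erase_of_mem (pvBest_mem r0 rest)]
  simp

-- repeated first-max extraction (the order in which B processes items)
def selSort : List (Int × Int × Int) → List (Int × Int × Int)
  | [] => []
  | r0 :: rest => pvBest r0 rest :: selSort ((r0 :: rest).erase (pvBest r0 rest))
termination_by l => l.length
decreasing_by exact pvEraseBestLen r0 rest

theorem pvBest_append (b x : Int × Int × Int) (rest : List (Int × Int × Int)) :
    pvBest b (rest ++ [x]) = if (pvBest b rest).1 < x.1 then x else pvBest b rest := by
  simp [pvBest, List.foldl_append]

-- stable descending insertion = appending to a first-max extraction sequence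
theorem ins_selSort (x : Int × Int × Int) :
    ∀ (n : Nat) (l : List (Int × Int × Int)), l.length = n →
      PySem.List.insertBy (fun a b => decide (b.1 < a.1)) x (selSort l) = selSort (l ++ [x]) := by
  intro n
  induction n using Nat.strong_induction_on with
  | _ n ih =>
    intro l hl
    match l with
    | [] => simp [selSort, PySem.List.insertBy, pvBest]
    | r0 :: rest =>
      have hm := pvBest_mem r0 rest
      rw [selSort]
      by_cases h : (pvBest r0 rest).1 < x.1
      · -- x strictly beats the max: it goes first, and x ∉ l
        have hx : x ∉ r0 :: rest := by
          intro hx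
          have := pvBest_max r0 rest x hx
          omega
        have hrhs : (r0 :: rest) ++ [x] = r0 :: (rest ++ [x]) := by simp
        rw [hrhs, selSort, pvBest_append, if_pos h]
        have herase : ((r0 :: (rest ++ [x])).erase x) = r0 :: rest := by
          have : (r0 :: (rest ++ [x])) = (r0 :: rest) ++ [x] := by simp
          rw [this, List.erase_append_right _ hx]
          simp
        rw [herase, selSort]
        simp [PySem.List.insertBy, h]
      · -- max stays in front; insert x into the tail
        have hrhs : (r0 :: rest) ++ [x] = r0 :: (rest ++ [x]) := by simp
        rw [hrhs, selSort, pvBest_append, if_neg h]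
        have herase : ((r0 :: (rest ++ [x])).erase (pvBest r0 rest))
            = ((r0 :: rest).erase (pvBest r0 rest)) ++ [x] := by
          have : (r0 :: (rest ++ [x])) = (r0 :: rest) ++ [x] := by simp
          rw [this, List.erase_append_left _ hm]
        rw [herase]
        have hlen : ((r0 :: rest).erase (pvBest r0 rest)).length < n := by
          have := pvEraseBestLen r0 rest
          omega
        have := ih _ hlen ((r0 :: rest).erase (pvBest r0 rest)) rfl
        simp only [PySem.List.insertBy, h, decide_false]
        simp only [Bool.false_eq_true, if_false]
        rw [this]

theorem foldl_ins_selSort (l : List (Int × Int × Int)) :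
    l.foldl (fun acc x => PySem.List.insertBy (fun a b => decide (b.1 < a.1)) x acc) []
      = selSort l := by
  induction l using List.reverseRecOn with
  | nil => simp [selSort]
  | append_singleton l x ih =>
    rw [List.foldl_append]
    simp only [List.foldl_cons, List.foldl_nil]
    rw [ih, ins_selSort x l.length l rfl]

theorem selLoop_eq_foldl (capacity : Int) :
    ∀ (n : Nat) (remaining : List (Int × Int × Int)), remaining.length = n →
      ∀ (sol : List Int) (tw tv : Int),
        selLoop remaining sol tw tv capacity =
          (((selSort remaining).foldl
              (fun (st : List Int × Int × Int) it =>
                if st.2.1 + it.2.1 ≤ capacity then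
                  (st.1.set it.2.2.toNat 1, st.2.1 + it.2.1, st.2.2 + it.1)
                else st)
              (sol, tw, tv)).1,
           ((selSort remaining).foldl
              (fun (st : List Int × Int × Int) it =>
                if st.2.1 + it.2.1 ≤ capacity then
                  (st.1.set it.2.2.toNat 1, st.2.1 + it.2.1, st.2.2 + it.1)
                else st)
              (sol, tw, tv)).2.2) := by
  intro n
  induction n using Nat.strong_induction_on with
  | _ n ih =>
    intro remaining hl sol tw tv
    match remaining with
    | [] => simp [selLoop, selSort]
    | r0 :: rest =>
      have hm := pvBest_mem r0 rest
      have hrem : (PySem.List.remove? (r0 :: rest) (pvBest r0 rest)).getD []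
          = (r0 :: rest).erase (pvBest r0 rest) := by
        rw [PySem.List.remove?_eq_some_erase _ _ hm]; rfl
      have hlen : ((r0 :: rest).erase (pvBest r0 rest)).length < n := by
        have := pvEraseBestLen r0 rest
        omega
      rw [selLoop, selSort]
      simp only [hrem, List.foldl_cons]
      by_cases h : tw + (pvBest r0 rest).2.1 ≤ capacity
      · rw [if_pos h, ih _ hlen _ rfl, if_pos h]
      · rw [if_neg h, ih _ hlen _ rfl, if_neg h]

theorem selLoop_eq (remaining : List (Int × Int × Int)) (sol : List Int) (tw tv capacity : Int) :
    selLoop remaining sol tw tv capacity =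
      (((selSort remaining).foldl
          (fun (st : List Int × Int × Int) it =>
            if st.2.1 + it.2.1 ≤ capacity then
              (st.1.set it.2.2.toNat 1, st.2.1 + it.2.1, st.2.2 + it.1)
            else st)
          (sol, tw, tv)).1,
       ((selSort remaining).foldl
          (fun (st : List Int × Int × Int) it =>
            if st.2.1 + it.2.1 ≤ capacity then
              (st.1.set it.2.2.toNat 1, st.2.1 + it.2.1, st.2.2 + it.1)
            else st)
          (sol, tw, tv)).2.2) :=
  selLoop_eq_foldl capacity remaining.length remaining rfl sol tw tv

-- ===== VERDICT (by name: the statement is the Claim_ definition above) =====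
theorem nearest_insertion_spec : Claim_equal_nearest_insertion := by
  intro weights values capacity _ _
  unfold Spec_nearest_insertion
  simp only [nearest_insertion, nearest_insertion_alt,
    PySem.List.sorted_rev_eq_foldl_insertBy, foldl_ins_selSort, selLoop_eq]
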